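-- pv_equiv track=rewrite | github.com/ucd-plse/PROSE | src/python/parsing.py | find_semicolon_idxs
-- ===== SOURCE A (Python) =====
-- def advance_idx_to_string_literal_end(line, i):
--     """given the index of a string literal delimiter, returns index of the matching
--     string literal delimiter that ends the string literal"""
--     delimiter = line[i]
--     while i + 1 < len(line):
--         i += 1
--         if line[i] == delimiter:
--             if i + 1 < len(line) and line[i] == line[i + 1] == delimiter:
--                 i += 1
--             elif line[i - 1] == "\\":
--                 continue
--             else:
--                 break
--     return i
--
-- def find_semicolon_idxs(line):
--     idxs = []
--     i = -1
--     while i + 1 < len(line):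
--         i += 1
--         if line[i] in ['"', "'"]:
--             i = advance_idx_to_string_literal_end(line, i)
--         elif line[i] == ";":
--             idxs.append(i)
--
--     return idxs
-- ===== SOURCE B (Python) =====
-- def find_semicolon_idxs(line):
--     # Stage 1: collect the spans (start, end) of all string literals.
--     n = len(line)
--     spans = []
--     i = 0
--     while i < n:
--         c = line[i]
--         if c == '"' or c == "'":
--             j = i
--             while j + 1 < n:
--                 j += 1
--                 if line[j] == c:
--                     if j + 1 < n and line[j + 1] == c:
--                         j += 1
--                     elif line[j - 1] == "\\":
--                         continue
--                     else:
--                         break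
--             spans.append((i, j))
--             i = j + 1
--         else:
--             i += 1
--     # Stage 2: semicolons not covered by any literal span.
--     return [k for k in range(n)
--             if line[k] == ";" and not any(s <= k <= e for s, e in spans)]
-- ===== Notes on version B (the rewrite author's own statement) =====
-- stated objective: alternative
-- what changed: Replaces A's single skipping scan that collects semicolons while jumping over literals via a helper with a two-stage design: stage 1 materialises the list of string-literal spans (start,end), stage 2 is a comprehension over all indices keeping semicolons covered by no span.
import Mathlib
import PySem

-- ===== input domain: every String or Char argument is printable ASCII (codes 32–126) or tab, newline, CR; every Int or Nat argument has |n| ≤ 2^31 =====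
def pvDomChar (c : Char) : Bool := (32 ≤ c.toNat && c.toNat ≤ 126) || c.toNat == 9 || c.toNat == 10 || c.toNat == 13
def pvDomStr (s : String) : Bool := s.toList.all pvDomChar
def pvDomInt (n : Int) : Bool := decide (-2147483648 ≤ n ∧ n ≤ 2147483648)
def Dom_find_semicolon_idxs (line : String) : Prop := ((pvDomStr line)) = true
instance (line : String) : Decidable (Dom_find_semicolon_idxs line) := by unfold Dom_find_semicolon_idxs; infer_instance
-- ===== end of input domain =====

-- B replaces A's skipping scan (helper jump over each literal) by two stages:
-- first build the list of string-literal spans, then filter all indices by a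
-- span-membership test (objective: alternative decomposition; same behaviour).
-- While-loops are transcribed as structural recursion on a fuel counter set to
-- the string length: every iteration advances the index by at least 1, so the
-- fuel never runs out before the Python loop condition fails.

-- ===== PORT A =====
-- the while-loop of advance_idx_to_string_literal_end (delimiter read once, loop state i)
def advLoopA (cs : List Char) (delim : Char) : Nat → Nat → Nat
  | 0, i => i
  | fuel+1, i =>
    if i + 1 < cs.length then
      -- i += 1; the incremented index is i+1
      if cs.getD (i+1) ' ' = delim then
        if i + 2 < cs.length ∧ cs.getD (i+1) ' ' = cs.getD (i+2) ' ' ∧ cs.getD (i+2) ' ' = delim then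
          advLoopA cs delim fuel (i+2)     -- doubled delimiter: i += 1 and continue
        else if cs.getD i ' ' = '\\' then
          advLoopA cs delim fuel (i+1)     -- backslash escape: continue
        else
          i + 1                            -- break: return current i
      else
        advLoopA cs delim fuel (i+1)
    else i

def advance_idx_to_string_literal_end (cs : List Char) (i : Nat) : Nat :=
  advLoopA cs (cs.getD i ' ') cs.length i

-- outer while-loop of A (k is the already-incremented index line[i] is read at)
def findLoopA (cs : List Char) : Nat → List Int → Nat → List Int
  | 0, idxs, _ => idxs
  | fuel+1, idxs, k =>
    if k < cs.length then
      if cs.getD k ' ' = '"' ∨ cs.getD k ' ' = '\'' then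
        findLoopA cs fuel idxs (advance_idx_to_string_literal_end cs k + 1)
      else if cs.getD k ' ' = ';' then
        findLoopA cs fuel (idxs ++ [(k : Int)]) (k+1)
      else
        findLoopA cs fuel idxs (k+1)
    else idxs

def find_semicolon_idxs (line : String) : List Int :=
  findLoopA line.toList line.toList.length [] 0

-- ===== PORT B =====
-- B's inner while (scan from the opening delimiter at j to the literal's end)
def advLoopB (cs : List Char) (c : Char) : Nat → Nat → Nat
  | 0, j => j
  | fuel+1, j =>
    if j + 1 < cs.length then
      if cs.getD (j+1) ' ' = c then
        if j + 2 < cs.length ∧ cs.getD (j+2) ' ' = c then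
          advLoopB cs c fuel (j+2)
        else if cs.getD j ' ' = '\\' then
          advLoopB cs c fuel (j+1)
        else
          j + 1
      else
        advLoopB cs c fuel (j+1)
    else j

-- Stage 1: the spans (start, end) of all string literals
def spansLoop (cs : List Char) : Nat → Nat → List (Nat × Nat)
  | 0, _ => []
  | fuel+1, i =>
    if i < cs.length then
      if cs.getD i ' ' = '"' ∨ cs.getD i ' ' = '\'' then
        (i, advLoopB cs (cs.getD i ' ') cs.length i) ::
          spansLoop cs fuel (advLoopB cs (cs.getD i ' ') cs.length i + 1)
      else
        spansLoop cs fuel (i+1)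
    else []

-- Stage 2: comprehension over range(n) keeping semicolons covered by no span
def find_semicolon_idxs_alt (line : String) : List Int :=
  let cs := line.toList
  let spans := spansLoop cs cs.length 0
  (List.range cs.length).filterMap (fun k =>
    if cs.getD k ' ' = ';' ∧ ¬ spans.any (fun p => p.1 ≤ k && k ≤ p.2) then
      some (k : Int)
    else none)

-- ===== PRECONDITION & SPEC =====
def Spec_find_semicolon_idxs (line : String) (out : List Int) : Prop := out = find_semicolon_idxs_alt line
instance (line : String) (out : List Int) : Decidable (Spec_find_semicolon_idxs line out) := by unfold Spec_find_semicolon_idxs; infer_instance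

-- ===== CLAIM (what is proved, stated in full; the proofs are below) =====
def Claim_equal_find_semicolon_idxs : Prop := ∀ (line : String), Dom_find_semicolon_idxs line → Spec_find_semicolon_idxs line (find_semicolon_idxs line)

-- ===== LEMMAS AND PROOFS =====

-- the two inner whiles compute the same index (same fuel, same start)
lemma adv_eq (cs : List Char) (c : Char) :
    ∀ fuel i, advLoopB cs c fuel i = advLoopA cs c fuel i := by
  intro fuel
  induction fuel with
  | zero => intro i; rfl
  | succ fuel ih =>
    intro i
    simp only [advLoopB, advLoopA]
    by_cases h1 : i + 1 < cs.length
    · rw [if_pos h1, if_pos h1]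
      by_cases hc : cs.getD (i+1) ' ' = c
      · rw [if_pos hc, if_pos hc]
        by_cases hd : i + 2 < cs.length ∧ cs.getD (i+2) ' ' = c
        · have hdA : i + 2 < cs.length ∧ cs.getD (i+1) ' ' = cs.getD (i+2) ' ' ∧ cs.getD (i+2) ' ' = c :=
            ⟨hd.1, hc.trans hd.2.symm, hd.2⟩
          rw [if_pos hd, if_pos hdA]
          exact ih (i+2)
        · have hdA : ¬ (i + 2 < cs.length ∧ cs.getD (i+1) ' ' = cs.getD (i+2) ' ' ∧ cs.getD (i+2) ' ' = c) :=
            fun h => hd ⟨h.1, h.2.2⟩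
          rw [if_neg hd, if_neg hdA]
          by_cases hb : cs.getD i ' ' = '\\'

          · rw [if_pos hb, if_pos hb]; exact ih (i+1)
          · rw [if_neg hb, if_neg hb]
      · rw [if_neg hc, if_neg hc]; exact ih (i+1)
    · rw [if_neg h1, if_neg h1]

lemma advLoopB_ge (cs : List Char) (c : Char) :
    ∀ fuel j, j ≤ advLoopB cs c fuel j := by
  intro fuel
  induction fuel with
  | zero => intro j; exact le_refl j
  | succ fuel ih =>
    intro j
    simp only [advLoopB]
    split_ifs
    · have := ih (j+2); omega
    · have := ih (j+1); omega
    · omega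
    · have := ih (j+1); omega
    · omega

lemma advLoopB_lt (cs : List Char) (c : Char) :
    ∀ fuel j, j < cs.length → advLoopB cs c fuel j < cs.length := by
  intro fuel
  induction fuel with
  | zero => intro j h; exact h
  | succ fuel ih =>
    intro j h
    simp only [advLoopB]
    split_ifs with h1 h2 h3 h4
    · exact ih (j+2) h3.1
    · exact ih (j+1) h1
    · exact h1
    · exact ih (j+1) h1
    · exact h

-- every span produced from position i starts at or after i
lemma spansLoop_lb (cs : List Char) :
    ∀ fuel i, ∀ p ∈ spansLoop cs fuel i, i ≤ p.1 ∧ p.1 ≤ p.2 := by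
  intro fuel
  induction fuel with
  | zero => intro i p hp; simp [spansLoop] at hp
  | succ fuel ih =>
    intro i p hp
    simp only [spansLoop] at hp
    by_cases hi : i < cs.length
    · rw [if_pos hi] at hp
      by_cases hq : cs.getD i ' ' = '"' ∨ cs.getD i ' ' = '\''
      · rw [if_pos hq] at hp
        rcases List.mem_cons.mp hp with h' | h'
        · subst h'; exact ⟨le_refl _, advLoopB_ge cs _ _ i⟩
        · have hge := advLoopB_ge cs (cs.getD i ' ') cs.length i
          have := ih (advLoopB cs (cs.getD i ' ') cs.length i + 1) p h'
          constructor <;> omega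
      · rw [if_neg hq] at hp
        have := ih (i+1) p hp
        constructor <;> omega
    · rw [if_neg hi] at hp
      simp at hp

-- B's stage-2 filter restricted to indices ≥ k
def semisFrom (cs : List Char) (spans : List (Nat × Nat)) (k : Nat) : List Int :=
  (List.range' k (cs.length - k)).filterMap (fun j =>
    if cs.getD j ' ' = ';' ∧ ¬ spans.any (fun p => p.1 ≤ j && j ≤ p.2) then
      some (j : Int)
    else none)

lemma semisFrom_cons (cs : List Char) (spans : List (Nat × Nat)) (k : Nat) (hk : k < cs.length) :
    semisFrom cs spans k =
      (if cs.getD k ' ' = ';' ∧ ¬ spans.any (fun p => p.1 ≤ k && k ≤ p.2) then [(k : Int)] else [])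
      ++ semisFrom cs spans (k+1) := by
  unfold semisFrom
  rw [show cs.length - k = (cs.length - (k+1)) + 1 by omega, List.range'_succ, List.filterMap_cons]
  split_ifs <;> simp

-- indices strictly beyond a span's end ignore that span
lemma semisFrom_pop (cs : List Char) (s e : Nat) (spans : List (Nat × Nat)) (k : Nat)
    (hk : e < k) : semisFrom cs ((s, e) :: spans) k = semisFrom cs spans k := by
  unfold semisFrom
  apply List.filterMap_congr
  intro j hj
  obtain ⟨i, _, rfl⟩ := List.mem_range'.mp hj
  have : ¬ ((s ≤ k + 1 * i && k + 1 * i ≤ e) = true) := by simp; omega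
  simp only [List.any_cons, this, Bool.false_or]

-- indices covered by the head span are all dropped
lemma semisFrom_skip (cs : List Char) (s e : Nat) (spans : List (Nat × Nat)) :
    ∀ m k, e + 1 - k ≤ m → s ≤ k → k ≤ e + 1 → e < cs.length →
    semisFrom cs ((s, e) :: spans) k = semisFrom cs ((s, e) :: spans) (e+1) := by
  intro m
  induction m with
  | zero =>
    intro k h1 _ _ _
    have : k = e + 1 := by omega
    rw [this]
  | succ m ih =>
    intro k h1 h2 h3 h4
    by_cases hke : k = e + 1
    · rw [hke]
    have hk : k < cs.length := by omega
    rw [semisFrom_cons cs _ k hk]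
    have hcov : ((s, e) :: spans).any (fun p => p.1 ≤ k && k ≤ p.2) = true := by
      simp only [List.any_cons, Bool.or_eq_true, Bool.and_eq_true, decide_eq_true_eq]
      left; constructor <;> omega
    rw [if_neg (by simp [hcov])]
    simpa using ih (k+1) (by omega) (by omega) (by omega) h4

-- enough fuel makes spansLoop independent of the fuel
lemma spansLoop_fuel (cs : List Char) :
    ∀ f1 f2 i, cs.length - i ≤ f1 → cs.length - i ≤ f2 →
      spansLoop cs f1 i = spansLoop cs f2 i := by
  intro f1
  induction f1 with
  | zero =>
    intro f2 i h1 h2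
    cases f2 with
    | zero => rfl
    | succ f2 =>
      simp only [spansLoop]
      rw [if_neg (by omega : ¬ i < cs.length)]
  | succ f1 ih =>
    intro f2 i h1 h2
    cases f2 with
    | zero =>
      simp only [spansLoop]
      rw [if_neg (by omega : ¬ i < cs.length)]
    | succ f2 =>
      simp only [spansLoop]
      by_cases hi : i < cs.length
      · rw [if_pos hi, if_pos hi]
        by_cases hq : cs.getD i ' ' = '"' ∨ cs.getD i ' ' = '\''
        · rw [if_pos hq, if_pos hq]
          have hge := advLoopB_ge cs (cs.getD i ' ') cs.length i
          rw [ih f2 _ (by omega) (by omega)]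
        · rw [if_neg hq, if_neg hq]
          rw [ih f2 (i+1) (by omega) (by omega)]
      · rw [if_neg hi, if_neg hi]

-- main invariant: A's outer loop from k equals idxs ++ (B's filter from k against spansLoop from k)
lemma main_inv (cs : List Char) :
    ∀ fuel k, cs.length - k ≤ fuel → ∀ idxs : List Int,
      findLoopA cs fuel idxs k = idxs ++ semisFrom cs (spansLoop cs cs.length k) k := by
  intro fuel
  induction fuel with
  | zero =>
    intro k h idxs
    simp only [findLoopA]
    unfold semisFrom
    rw [show cs.length - k = 0 by omega]
    simp [List.range']
  | succ fuel ih =>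
    intro k h idxs
    simp only [findLoopA]
    by_cases hk : k < cs.length
    · rw [if_pos hk]
      by_cases hq : cs.getD k ' ' = '"' ∨ cs.getD k ' ' = '\''
      · rw [if_pos hq]
        set j := advLoopB cs (cs.getD k ' ') cs.length k with hj
        have hjA : advance_idx_to_string_literal_end cs k = j := by
          simp [advance_idx_to_string_literal_end, adv_eq, hj]
        have hkj : k ≤ j := advLoopB_ge cs _ _ k
        have hjn : j < cs.length := advLoopB_lt cs _ _ k hk
        rw [hjA, ih (j+1) (by omega) idxs]
        congr 1
        have hsp : spansLoop cs cs.length k = (k, j) :: spansLoop cs cs.length (j+1) := by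
          conv_lhs => rw [show cs.length = (cs.length - 1) + 1 by omega]
          simp only [spansLoop]
          rw [if_pos hk, if_pos hq, ← hj]
          rw [spansLoop_fuel cs (cs.length - 1) cs.length (j+1) (by omega) (by omega)]
        rw [hsp]
        rw [semisFrom_skip cs k j _ (j + 1 - k) k (by omega) (le_refl _) (by omega) hjn]
        exact (semisFrom_pop cs k j _ (j+1) (by omega)).symm
      · rw [if_neg hq]
        have hsp : spansLoop cs cs.length k = spansLoop cs cs.length (k+1) := by
          conv_lhs => rw [show cs.length = (cs.length - 1) + 1 by omega]
          simp only [spansLoop]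
          rw [if_pos hk, if_neg hq]
          exact spansLoop_fuel cs (cs.length - 1) cs.length (k+1) (by omega) (by omega)
        by_cases hsc : cs.getD k ' ' = ';'
        · rw [if_pos hsc, ih (k+1) (by omega) (idxs ++ [(k : Int)])]
          rw [semisFrom_cons cs _ k hk, hsp]
          have hnc : (spansLoop cs cs.length (k+1)).any (fun p => p.1 ≤ k && k ≤ p.2) = false := by
            rw [List.any_eq_false]
            intro p hp
            have := spansLoop_lb cs cs.length (k+1) p hp
            simp; omega
          rw [if_pos ⟨hsc, by simp [hnc]⟩]
          simp
        · rw [if_neg hsc, ih (k+1) (by omega) idxs]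
          rw [semisFrom_cons cs _ k hk, hsp, if_neg (fun h => hsc h.1)]
          simp
    · rw [if_neg hk]
      unfold semisFrom
      rw [show cs.length - k = 0 by omega]
      simp [List.range']

-- ===== VERDICT (by name: the statement is the Claim_ definition above) =====
theorem find_semicolon_idxs_spec : Claim_equal_find_semicolon_idxs := by
  intro line _
  unfold Spec_find_semicolon_idxs find_semicolon_idxs find_semicolon_idxs_alt
  rw [main_inv line.toList line.toList.length 0 (by omega) []]
  unfold semisFrom
  simp [List.range_eq_range']
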